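-- pv_equiv track=rewrite | github.com/M1rv1/- | Интерфейс.py | schedule_trans
-- ===== SOURCE A (Python) =====
-- def schedule_trans(schedule):
--     if schedule == None:
--         return None, []
--
--     teacher_trans = []
--     trans = 0
--
--     # teacher_day_usage: (teacher, day): [(slot, building)]
--     teacher_day_usage = {}
--     for (day_n, slot, class_name), (teacher_name, building) in schedule.items():
--         # Соберём все уроки этого учителя в этот день
--         for teacher in teacher_name:
--             if teacher_day_usage.get((teacher, day_n), False) is False:
--                 teacher_day_usage[(teacher, day_n)] = [(slot, building)]
--             else:
--                 teacher_day_usage[(teacher, day_n)].append((slot, building))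
--
--     # Теперь для каждого (teacher, day) смотрим, были ли реальные переходы
--     for teacher in teacher_day_usage:
--         start_point = teacher_day_usage[teacher][0]
--         for slot_bulding in teacher_day_usage[teacher]:
--             if slot_bulding[1] != start_point[1]:
--                 teacher_trans.append((teacher[0], teacher[1]))
--                 trans += 1
--                 break
--     return trans, teacher_trans
-- ===== SOURCE B (Python) =====
-- def schedule_trans(schedule):
--     if schedule is None:
--         return None, []
--     first_building = {}
--     transition = {}
--     for (day_n, slot, class_name), (teacher_name, building) in schedule.items():
--         for teacher in teacher_name:
--             key = (teacher, day_n)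
--             if key not in first_building:
--                 first_building[key] = building
--                 transition[key] = False
--             elif building != first_building[key]:
--                 transition[key] = True
--     teacher_trans = [key for key, flag in transition.items() if flag]
--     return len(teacher_trans), teacher_trans
-- ===== Notes on version B (the rewrite author's own statement) =====
-- stated objective: alternative
-- what changed: Instead of grouping every (slot,building) pair into per-key lists and then re-scanning each key's list for a differing building, B keeps only two scalar dicts (first building seen and a boolean transition flag) updated in the single pass, then emits the flagged keys in insertion order.
import Mathlib
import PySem

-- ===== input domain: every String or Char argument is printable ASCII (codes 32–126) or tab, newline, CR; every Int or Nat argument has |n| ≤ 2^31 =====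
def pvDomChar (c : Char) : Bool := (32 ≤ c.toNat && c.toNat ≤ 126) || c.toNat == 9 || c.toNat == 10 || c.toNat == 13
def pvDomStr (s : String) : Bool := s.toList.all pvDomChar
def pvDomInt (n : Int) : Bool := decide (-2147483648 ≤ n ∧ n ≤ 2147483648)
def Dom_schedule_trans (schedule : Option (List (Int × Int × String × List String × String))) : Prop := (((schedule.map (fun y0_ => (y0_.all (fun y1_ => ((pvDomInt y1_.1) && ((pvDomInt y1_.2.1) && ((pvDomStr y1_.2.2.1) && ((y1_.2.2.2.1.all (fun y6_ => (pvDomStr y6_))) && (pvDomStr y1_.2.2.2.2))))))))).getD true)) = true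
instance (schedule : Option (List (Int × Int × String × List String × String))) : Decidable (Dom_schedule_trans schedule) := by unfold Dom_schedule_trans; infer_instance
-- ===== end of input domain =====

-- B replaces A's per-key (slot,building) lists + second per-key scan by two scalar dicts
-- (first building, transition flag) maintained in the single pass; return values proved equal.

-- ===== PORT A =====
-- inner 'for slot_bulding in …: if …: …; break' of A's second loop (break = stop at first hit)
def aHasTrans : List (Int × String) → (Int × String) → Bool
  | [], _ => false
  | x :: rest, sp => if x.2 ≠ sp.2 then true else aHasTrans rest sp

def schedule_trans (schedule : Option (List (Int × Int × String × List String × String))) : Option Int × (List (String × Int)) :=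
  match schedule with
  | none => (none, [])
  | some rows =>
    -- first loop: teacher_day_usage[(teacher, day_n)] : list of (slot, building)
    let usage : PySem.Dict (String × Int) (List (Int × String)) :=
      rows.foldl (fun u r =>
        r.2.2.2.1.foldl (fun u teacher =>
          match u.get? (teacher, r.1) with
          | none => u.insert (teacher, r.1) [(r.2.1, r.2.2.2.2)]      -- .get(…, False) is False → fresh singleton
          | some l => u.insert (teacher, r.1) (l ++ [(r.2.1, r.2.2.2.2)])) u) PySem.Dict.empty
    -- second loop: for teacher in teacher_day_usage (keys, insertion order)
    let res := usage.keys.foldl (fun st k =>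
        let vals := usage.getD k []
        let start_point := PySem.List.pyGetD vals 0 (0, "")   -- [0]; in range: usage values are nonempty
        if aHasTrans vals start_point then (st.1 + 1, st.2 ++ [(k.1, k.2)]) else st)
      ((0 : Int), ([] : List (String × Int)))
    (some res.1, res.2)

-- ===== PORT B =====
def schedule_trans_alt (schedule : Option (List (Int × Int × String × List String × String))) : Option Int × (List (String × Int)) :=
  match schedule with
  | none => (none, [])
  | some rows =>
    let st :=
      rows.foldl (fun st r =>
        r.2.2.2.1.foldl (fun (st : PySem.Dict (String × Int) String × PySem.Dict (String × Int) Bool) teacher =>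
          match st.1.get? (teacher, r.1) with
          | none => (st.1.insert (teacher, r.1) r.2.2.2.2, st.2.insert (teacher, r.1) false)
          | some fb => if r.2.2.2.2 ≠ fb then (st.1, st.2.insert (teacher, r.1) true) else st) st)
        (PySem.Dict.empty, PySem.Dict.empty)
    let teacher_trans := (st.2.items.filter (fun p => p.2)).map (fun p => p.1)
    (some (teacher_trans.length : Int), teacher_trans)

-- ===== PRECONDITION & SPEC =====
def Spec_schedule_trans (schedule : Option (List (Int × Int × String × List String × String))) (out : Option Int × (List (String × Int))) : Prop := out = schedule_trans_alt schedule
instance (schedule : Option (List (Int × Int × String × List String × String))) (out : Option Int × (List (String × Int))) : Decidable (Spec_schedule_trans schedule out) := by unfold Spec_schedule_trans; infer_instance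

-- ===== CLAIM (what is proved, stated in full; the proofs are below) =====
def Claim_equal_schedule_trans : Prop := ∀ (schedule : Option (List (Int × Int × String × List String × String))), Dom_schedule_trans schedule → Spec_schedule_trans schedule (schedule_trans schedule)

-- ===== LEMMAS AND PROOFS =====

-- proof-only helpers: the flattened event stream (one entry per teacher occurrence)
def pvEv (r : Int × Int × String × List String × String) : List ((String × Int) × (Int × String)) :=
  r.2.2.2.1.map (fun t => ((t, r.1), (r.2.1, r.2.2.2.2)))

def pvAstep (u : PySem.Dict (String × Int) (List (Int × String))) (p : (String × Int) × (Int × String)) : PySem.Dict (String × Int) (List (Int × String)) :=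
  match u.get? p.1 with
  | none => u.insert p.1 [p.2]
  | some l => u.insert p.1 (l ++ [p.2])

def pvBstep (st : PySem.Dict (String × Int) String × PySem.Dict (String × Int) Bool) (p : (String × Int) × (Int × String)) : PySem.Dict (String × Int) String × PySem.Dict (String × Int) Bool :=
  match st.1.get? p.1 with
  | none => (st.1.insert p.1 p.2.2, st.2.insert p.1 false)
  | some fb => if p.2.2 ≠ fb then (st.1, st.2.insert p.1 true) else st

def pvVals (l : List ((String × Int) × (Int × String))) (k : String × Int) : List (Int × String) :=
  (l.filter (fun p => p.1 == k)).map (·.2)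

def pvP (l : List ((String × Int) × (Int × String))) (k : String × Int) : Bool :=
  match pvVals l k with
  | [] => false
  | v :: rest => rest.any (fun x => decide (x.2 ≠ v.2))

theorem pvVals_append (l : List ((String × Int) × (Int × String))) (p : (String × Int) × (Int × String)) (k : String × Int) :
    pvVals (l ++ [p]) k = pvVals l k ++ (if p.1 = k then [p.2] else []) := by
  simp [pvVals, List.filter_append]
  by_cases h : p.1 = k <;> simp [h]

theorem pvVals_eq_nil_iff (l : List ((String × Int) × (Int × String))) (k : String × Int) :
    pvVals l k = [] ↔ k ∉ l.map (·.1) := by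
  simp [pvVals, List.filter_eq_nil_iff, List.mem_map]
  aesop

theorem pvA_flat (rows : List (Int × Int × String × List String × String)) (u0 : PySem.Dict (String × Int) (List (Int × String))) :
    rows.foldl (fun u r =>
        r.2.2.2.1.foldl (fun u teacher =>
          match u.get? (teacher, r.1) with
          | none => u.insert (teacher, r.1) [(r.2.1, r.2.2.2.2)]
          | some l => u.insert (teacher, r.1) (l ++ [(r.2.1, r.2.2.2.2)])) u) u0
      = (rows.flatMap pvEv).foldl pvAstep u0 := by
  induction rows generalizing u0 with
  | nil => rfl
  | cons r rows ih =>
    simp only [List.foldl_cons, List.flatMap_cons, List.foldl_append, ih, pvEv, List.foldl_map]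
    rfl

theorem pvB_flat (rows : List (Int × Int × String × List String × String)) (st0 : PySem.Dict (String × Int) String × PySem.Dict (String × Int) Bool) :
    rows.foldl (fun st r =>
        r.2.2.2.1.foldl (fun (st : PySem.Dict (String × Int) String × PySem.Dict (String × Int) Bool) teacher =>
          match st.1.get? (teacher, r.1) with
          | none => (st.1.insert (teacher, r.1) r.2.2.2.2, st.2.insert (teacher, r.1) false)
          | some fb => if r.2.2.2.2 ≠ fb then (st.1, st.2.insert (teacher, r.1) true) else st) st) st0
      = (rows.flatMap pvEv).foldl pvBstep st0 := by
  induction rows generalizing st0 with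
  | nil => rfl
  | cons r rows ih =>
    simp only [List.foldl_cons, List.flatMap_cons, List.foldl_append, ih, pvEv, List.foldl_map]
    rfl

theorem pvA_get (l : List ((String × Int) × (Int × String))) (k : String × Int) :
    (l.foldl pvAstep PySem.Dict.empty).get? k
      = if pvVals l k = [] then none else some (pvVals l k) := by
  induction l using List.reverseRecOn with
  | nil => simp [pvVals, PySem.Dict.get?_empty]
  | append_singleton l p ih =>
    rw [List.foldl_append, List.foldl_cons, List.foldl_nil]
    by_cases hk : k = p.1
    · subst hk
      simp only [pvAstep]
      cases hget : (l.foldl pvAstep PySem.Dict.empty).get? p.1 with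
      | none =>
        rw [hget] at ih
        have hnil : pvVals l p.1 = [] := by
          by_contra h; rw [if_neg h] at ih; simp at ih
        simp [PySem.Dict.get?_insert_self, pvVals_append, hnil]
      | some v =>
        rw [hget] at ih
        have hne : pvVals l p.1 ≠ [] := by
          intro h; rw [if_pos h] at ih; simp at ih
        have hv : v = pvVals l p.1 := by rw [if_neg hne] at ih; exact Option.some.inj ih
        simp [PySem.Dict.get?_insert_self, pvVals_append, hne, hv]
    · have hk' : k ≠ p.1 := hk
      have : pvVals (l ++ [p]) k = pvVals l k := by
        rw [pvVals_append, if_neg (fun h => hk' h.symm), List.append_nil]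
      rw [this]
      simp only [pvAstep]
      cases hget : (l.foldl pvAstep PySem.Dict.empty).get? p.1 with
      | none => rw [PySem.Dict.get?_insert_of_ne _ _ hk']; exact ih
      | some v => rw [PySem.Dict.get?_insert_of_ne _ _ hk']; exact ih

theorem pvA_keys (l : List ((String × Int) × (Int × String))) :
    (l.foldl pvAstep PySem.Dict.empty).keys = PySem.Set.ofList (l.map (·.1)) := by
  induction l using List.reverseRecOn with
  | nil => simp [PySem.Dict.keys_empty, PySem.Set.ofList_nil]
  | append_singleton l p ih =>
    rw [List.foldl_append, List.foldl_cons, List.foldl_nil, List.map_append, List.map_singleton,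
      PySem.Set.ofList_append_singleton]
    by_cases hmem : p.1 ∈ l.map (·.1)
    · have hvals : pvVals l p.1 ≠ [] := by rw [Ne, pvVals_eq_nil_iff]; simpa using hmem
      have hget : (l.foldl pvAstep PySem.Dict.empty).get? p.1 = some (pvVals l p.1) := by
        rw [pvA_get, if_neg hvals]
      have hcont : (l.foldl pvAstep PySem.Dict.empty).contains p.1 = true := by
        rw [PySem.Dict.contains_eq_isSome_get?, hget]; rfl
      simp only [pvAstep, hget]
      simp only [PySem.Dict.keys_insert_of_contains, hcont, ih]
      rw [PySem.Set.add_of_mem ((PySem.Set.mem_ofList _ _).mpr hmem)]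
    · have hvals : pvVals l p.1 = [] := (pvVals_eq_nil_iff _ _).mpr hmem
      have hget : (l.foldl pvAstep PySem.Dict.empty).get? p.1 = none := by
        rw [pvA_get, if_pos hvals]
      have hcont : (l.foldl pvAstep PySem.Dict.empty).contains p.1 = false := by
        rw [PySem.Dict.contains_eq_isSome_get?, hget]; rfl
      simp only [pvAstep, hget]
      simp only [PySem.Dict.keys_insert_of_not_contains, hcont, ih]
      rw [PySem.Set.add_of_not_mem (by rw [(PySem.Set.mem_ofList _ _)]; exact hmem)]

theorem pvB_inv (l : List ((String × Int) × (Int × String))) :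
    (∀ k, (l.foldl pvBstep (PySem.Dict.empty, PySem.Dict.empty)).1.get? k = ((pvVals l k).head?).map (·.2))
    ∧ (∀ k, (l.foldl pvBstep (PySem.Dict.empty, PySem.Dict.empty)).2.get? k
        = match pvVals l k with
          | [] => none
          | v :: rest => some (rest.any (fun x => decide (x.2 ≠ v.2))))
    ∧ (l.foldl pvBstep (PySem.Dict.empty, PySem.Dict.empty)).2.keys = PySem.Set.ofList (l.map (·.1)) := by
  induction l using List.reverseRecOn with
  | nil => refine ⟨fun k => ?_, fun k => ?_, ?_⟩ <;> simp [pvVals, PySem.Dict.get?_empty, PySem.Dict.keys_empty, PySem.Set.ofList_nil]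
  | append_singleton l p ih =>
    obtain ⟨ih1, ih2, ih3⟩ := ih
    rw [List.foldl_append, List.foldl_cons, List.foldl_nil]
    cases hf : (l.foldl pvBstep (PySem.Dict.empty, PySem.Dict.empty)).1.get? p.1 with
    | none =>
      have hnil : pvVals l p.1 = [] := by
        have := ih1 p.1; rw [hf] at this
        cases h : pvVals l p.1 with
        | nil => rfl
        | cons v rest => rw [h] at this; simp at this
      have hcont : (l.foldl pvBstep (PySem.Dict.empty, PySem.Dict.empty)).2.contains p.1 = false := by
        rw [PySem.Dict.contains_eq_isSome_get?, ih2 p.1, hnil]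
        rfl
      refine ⟨fun k => ?_, fun k => ?_, ?_⟩
      · simp only [pvBstep, hf]
        by_cases hk : k = p.1
        · subst hk
          rw [PySem.Dict.get?_insert_self, pvVals_append, hnil, if_pos rfl]
          rfl
        · rw [PySem.Dict.get?_insert_of_ne _ _ hk, pvVals_append,
            if_neg (fun h => hk h.symm), List.append_nil]
          exact ih1 k
      · simp only [pvBstep, hf]
        by_cases hk : k = p.1
        · subst hk
          rw [PySem.Dict.get?_insert_self, pvVals_append, hnil, if_pos rfl]
          rfl
        · rw [PySem.Dict.get?_insert_of_ne _ _ hk, pvVals_append,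
            if_neg (fun h => hk h.symm), List.append_nil]
          exact ih2 k
      · simp only [pvBstep, hf]
        simp only [PySem.Dict.keys_insert_of_not_contains, hcont, ih3]
        rw [List.map_append, List.map_singleton, PySem.Set.ofList_append_singleton,
          PySem.Set.add_of_not_mem (by rw [PySem.Set.mem_ofList]; exact ((pvVals_eq_nil_iff l p.1).mp hnil))]
    | some fb =>
      have hne : pvVals l p.1 ≠ [] := by
        intro h
        have := ih1 p.1; rw [hf, h] at this; simp at this
      obtain ⟨v0, rest0, hv⟩ : ∃ v0 rest0, pvVals l p.1 = v0 :: rest0 := by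
        cases h : pvVals l p.1 with
        | nil => exact absurd h hne
        | cons v rest => exact ⟨v, rest, rfl⟩
      have hfb : fb = v0.2 := by
        have := ih1 p.1; rw [hf, hv] at this
        simpa using this
      have hcont : (l.foldl pvBstep (PySem.Dict.empty, PySem.Dict.empty)).2.contains p.1 = true := by
        rw [PySem.Dict.contains_eq_isSome_get?, ih2 p.1, hv]
        rfl
      have hmem : p.1 ∈ l.map (·.1) := by
        by_contra h; exact hne ((pvVals_eq_nil_iff l p.1).mpr h)
      have hkeys : (pvBstep (l.foldl pvBstep (PySem.Dict.empty, PySem.Dict.empty)) p).2.keys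
          = PySem.Set.ofList ((l ++ [p]).map (·.1)) := by
        rw [List.map_append, List.map_singleton, PySem.Set.ofList_append_singleton,
          PySem.Set.add_of_mem (by rw [PySem.Set.mem_ofList]; exact hmem)]
        simp only [pvBstep, hf]
        by_cases hb : p.2.2 ≠ fb
        · rw [if_pos hb]
          simp only [PySem.Dict.keys_insert_of_contains, hcont, ih3]
        · rw [if_neg hb]
          exact ih3
      refine ⟨fun k => ?_, fun k => ?_, hkeys⟩
      · simp only [pvBstep, hf]
        by_cases hk : k = p.1
        · subst hk
          have lhs_eq : (if p.2.2 ≠ fb then ((l.foldl pvBstep (PySem.Dict.empty, PySem.Dict.empty)).1,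
                (l.foldl pvBstep (PySem.Dict.empty, PySem.Dict.empty)).2.insert p.1 true)
              else (l.foldl pvBstep (PySem.Dict.empty, PySem.Dict.empty))).1.get? p.1 = some fb := by
            by_cases hb : p.2.2 ≠ fb
            · rw [if_pos hb]; exact hf
            · rw [if_neg hb]; exact hf
          rw [lhs_eq, pvVals_append, if_pos rfl, hv, hfb]
          rfl
        · have lhs_eq : (if p.2.2 ≠ fb then ((l.foldl pvBstep (PySem.Dict.empty, PySem.Dict.empty)).1,
                (l.foldl pvBstep (PySem.Dict.empty, PySem.Dict.empty)).2.insert p.1 true)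
              else (l.foldl pvBstep (PySem.Dict.empty, PySem.Dict.empty))).1.get? k
              = (l.foldl pvBstep (PySem.Dict.empty, PySem.Dict.empty)).1.get? k := by
            by_cases hb : p.2.2 ≠ fb
            · rw [if_pos hb]
            · rw [if_neg hb]
          rw [lhs_eq, pvVals_append, if_neg (fun h => hk h.symm), List.append_nil]
          exact ih1 k
      · simp only [pvBstep, hf]
        by_cases hk : k = p.1
        · subst hk
          rw [pvVals_append, if_pos rfl, hv]
          by_cases hb : p.2.2 ≠ fb
          · rw [if_pos hb]
            simp only [PySem.Dict.get?_insert_self]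
            have hbv : p.2.2 ≠ v0.2 := by rw [← hfb]; exact hb
            have hany : (rest0 ++ [p.2]).any (fun x => decide (x.2 ≠ v0.2)) = true := by
              simp [List.any_append, hbv]
            show some true = some ((rest0 ++ [p.2]).any fun x => decide (x.2 ≠ v0.2))
            rw [hany]
          · rw [if_neg hb]
            have hb' : p.2.2 = v0.2 := by rw [← hfb]; exact not_not.mp hb
            have := ih2 p.1; rw [hv] at this
            rw [this]
            simp [List.any_append, hb']
        · have lhs_eq : (if p.2.2 ≠ fb then ((l.foldl pvBstep (PySem.Dict.empty, PySem.Dict.empty)).1,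
                (l.foldl pvBstep (PySem.Dict.empty, PySem.Dict.empty)).2.insert p.1 true)
              else (l.foldl pvBstep (PySem.Dict.empty, PySem.Dict.empty))).2.get? k
              = (l.foldl pvBstep (PySem.Dict.empty, PySem.Dict.empty)).2.get? k := by
            by_cases hb : p.2.2 ≠ fb
            · rw [if_pos hb]; exact PySem.Dict.get?_insert_of_ne _ _ hk
            · rw [if_neg hb]
          rw [lhs_eq, pvVals_append, if_neg (fun h => hk h.symm), List.append_nil]
          exact ih2 k

theorem aHasTrans_any (xs : List (Int × String)) (sp : Int × String) :
    aHasTrans xs sp = xs.any (fun x => decide (x.2 ≠ sp.2)) := by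
  induction xs with
  | nil => rfl
  | cons x xs ih =>
    simp only [aHasTrans, List.any_cons]
    by_cases h : x.2 ≠ sp.2 <;> simp [h, ih]

theorem pvCountFold (P : (String × Int) → Bool) (ks : List (String × Int)) (n : Int) (acc : List (String × Int)) :
    ks.foldl (fun st k => if P k then (st.1 + 1, st.2 ++ [(k.1, k.2)]) else st) (n, acc)
      = (n + ((ks.filter P).length : Int), acc ++ ks.filter P) := by
  induction ks generalizing n acc with
  | nil => simp
  | cons k ks ih =>
    by_cases h : P k
    · simp [h, ih, add_comm, add_left_comm]
    · simp [h, ih]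

theorem pvEmit (g P : (String × Int) → Bool) : ∀ (ks : List (String × Int)), (∀ k ∈ ks, g k = P k) →
    ((ks.map (fun k => (k, g k))).filter (fun p => p.2)).map (fun p => p.1) = ks.filter P
  | [], _ => rfl
  | k :: ks, h => by
    have hk := h k (List.mem_cons_self ..)
    have ih := pvEmit g P ks (fun x hx => h x (List.mem_cons_of_mem _ hx))
    cases hP : P k
    · simp [hk, hP, ih]
    · simp [hk, hP, ih]

-- ===== VERDICT (by name: the statement is the Claim_ definition above) =====
theorem schedule_trans_spec : Claim_equal_schedule_trans := by
  intro schedule _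
  unfold Spec_schedule_trans
  cases schedule with
  | none => rfl
  | some rows =>
    simp only [schedule_trans, schedule_trans_alt]
    rw [pvA_flat, pvB_flat]
    obtain ⟨hB1, hB2, hB3⟩ := pvB_inv (rows.flatMap pvEv)
    have hnd : ((rows.flatMap pvEv).foldl pvBstep (PySem.Dict.empty, PySem.Dict.empty)).2.keys.Nodup := by
      rw [hB3]; exact PySem.Set.nodup_ofList _
    rw [PySem.Dict.items_eq_map_keys _ hnd false, hB3, pvA_keys]
    have hcond : ∀ (st : Int × List (String × Int)) (k : String × Int),
        k ∈ PySem.Set.ofList ((rows.flatMap pvEv).map (·.1)) →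
        (if aHasTrans (((rows.flatMap pvEv).foldl pvAstep PySem.Dict.empty).getD k [])
              (PySem.List.pyGetD (((rows.flatMap pvEv).foldl pvAstep PySem.Dict.empty).getD k []) 0 (0, ""))
          then (st.1 + 1, st.2 ++ [(k.1, k.2)]) else st)
        = (if pvP (rows.flatMap pvEv) k then (st.1 + 1, st.2 ++ [(k.1, k.2)]) else st) := by
      intro st k hk
      have hmem : k ∈ (rows.flatMap pvEv).map (·.1) := (PySem.Set.mem_ofList _ _).mp hk
      have hne : pvVals (rows.flatMap pvEv) k ≠ [] := by
        rw [Ne, pvVals_eq_nil_iff]; simpa using hmem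
      obtain ⟨v0, rest0, hv⟩ : ∃ v0 rest0, pvVals (rows.flatMap pvEv) k = v0 :: rest0 := by
        cases h : pvVals (rows.flatMap pvEv) k with
        | nil => exact absurd h hne
        | cons v rest => exact ⟨v, rest, rfl⟩
      have hgetD : ((rows.flatMap pvEv).foldl pvAstep PySem.Dict.empty).getD k [] = v0 :: rest0 := by
        rw [PySem.Dict.getD_eq_get?_getD, pvA_get, if_neg hne, hv]
        rfl
      rw [hgetD, PySem.List.pyGetD_zero_cons, aHasTrans_any, pvP, hv]
      have hd : (decide ¬v0.2 = v0.2) = false := by simp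
      show (if ((decide ¬v0.2 = v0.2) || rest0.any fun x => decide ¬x.2 = v0.2) = true
          then (st.1 + 1, st.2 ++ [(k.1, k.2)]) else st)
        = if (rest0.any fun x => decide ¬x.2 = v0.2) = true then (st.1 + 1, st.2 ++ [(k.1, k.2)]) else st
      rw [hd, Bool.false_or]
    rw [PySem.List.foldl_congr_mem (h := hcond), pvCountFold]
    have hflag : ∀ k ∈ PySem.Set.ofList ((rows.flatMap pvEv).map (·.1)),
        ((rows.flatMap pvEv).foldl pvBstep (PySem.Dict.empty, PySem.Dict.empty)).2.getD k false
          = pvP (rows.flatMap pvEv) k := by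
      intro k hk
      have hmem : k ∈ (rows.flatMap pvEv).map (·.1) := (PySem.Set.mem_ofList _ _).mp hk
      have hne : pvVals (rows.flatMap pvEv) k ≠ [] := by
        rw [Ne, pvVals_eq_nil_iff]; simpa using hmem
      obtain ⟨v0, rest0, hv⟩ : ∃ v0 rest0, pvVals (rows.flatMap pvEv) k = v0 :: rest0 := by
        cases h : pvVals (rows.flatMap pvEv) k with
        | nil => exact absurd h hne
        | cons v rest => exact ⟨v, rest, rfl⟩
      simp only [PySem.Dict.getD_eq_get?_getD, hB2 k, hv, pvP]
      rfl
    rw [pvEmit _ (fun k => pvP (rows.flatMap pvEv) k) _ hflag]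
    simp
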